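-- pv_equiv track=rewrite | github.com/nikhi757/YoctoLens | yoctolens/severity.py | compute_overall_severity
-- ===== SOURCE A (Python) =====
-- SEVERITY_MAP = {
--     "Missing Provider": "High",
--     "Fetch Failure": "High",
--     "ABI Symbol Missing": "High",
--     "Patch Failure": "Medium",
--     "QA Failure": "Medium",
--     "Runtime Dependency Missing": "High",
--     "Circular Dependency": "High",
--     "Taskhash Mismatch": "Medium",
--     "Unknown": "Low"
-- }
--
-- SEVERITY_RANK = {
--     "Low": 1,
--     "Medium": 2,
--     "High": 3
-- }
--
-- def assign_severity(error_type):
--     return SEVERITY_MAP.get(error_type, "Low")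
--
-- def compute_overall_severity(failures):
--     if not failures:
--         return "None"
--
--     highest = 0
--     for failure in failures:
--         severity = assign_severity(failure["error_type"])
--         rank = SEVERITY_RANK.get(severity, 1)
--         highest = max(highest, rank)
--
--     for sev, rank in SEVERITY_RANK.items():
--         if rank == highest:
--             return sev
--
--     return "Low"
-- ===== SOURCE B (Python) =====
-- SEVERITY_MAP = {
--     "Missing Provider": "High",
--     "Fetch Failure": "High",
--     "ABI Symbol Missing": "High",
--     "Patch Failure": "Medium",
--     "QA Failure": "Medium",
--     "Runtime Dependency Missing": "High",
--     "Circular Dependency": "High",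
--     "Taskhash Mismatch": "Medium",
--     "Unknown": "Low"
-- }
--
--
-- def assign_severity(error_type):
--     return SEVERITY_MAP.get(error_type, "Low")
--
--
-- def compute_overall_severity(failures):
--     if not failures:
--         return "None"
--     sevs = [assign_severity(f["error_type"]) for f in failures]
--     for level in ("High", "Medium", "Low"):
--         if level in sevs:
--             return level
--     return "Low"
-- ===== Notes on version B (the rewrite author's own statement) =====
-- stated objective: simpler
-- what changed: Replaces the numeric max-rank accumulation plus reverse rank-to-name lookup loop with a materialized severity list and ordered membership checks (first of High/Medium/Low present wins).
import Mathlib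
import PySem

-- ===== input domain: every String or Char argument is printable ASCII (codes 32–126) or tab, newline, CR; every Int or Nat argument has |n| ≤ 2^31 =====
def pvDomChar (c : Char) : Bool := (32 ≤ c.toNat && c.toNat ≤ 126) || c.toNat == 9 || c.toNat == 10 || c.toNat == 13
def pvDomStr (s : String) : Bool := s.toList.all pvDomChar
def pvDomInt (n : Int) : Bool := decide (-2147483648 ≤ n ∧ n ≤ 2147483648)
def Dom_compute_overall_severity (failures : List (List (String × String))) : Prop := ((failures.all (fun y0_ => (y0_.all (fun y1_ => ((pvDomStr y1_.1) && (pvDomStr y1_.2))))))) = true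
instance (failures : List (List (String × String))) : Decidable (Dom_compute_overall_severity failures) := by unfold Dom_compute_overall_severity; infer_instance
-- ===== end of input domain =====

-- B replaces A's numeric max-rank accumulation + reverse rank-to-name lookup by a severity list
-- and ordered membership checks (first of High/Medium/Low present wins); simpler, same cost.

-- ===== PORT A =====
-- module constant SEVERITY_MAP (shared by both Pythons)
def sevMap : PySem.Dict String String := PySem.Dict.mk
  [("Missing Provider", "High"), ("Fetch Failure", "High"), ("ABI Symbol Missing", "High"),
   ("Patch Failure", "Medium"), ("QA Failure", "Medium"), ("Runtime Dependency Missing", "High"),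
   ("Circular Dependency", "High"), ("Taskhash Mismatch", "Medium"), ("Unknown", "Low")]

-- module constant SEVERITY_RANK
def sevRank : PySem.Dict String Int := PySem.Dict.mk [("Low", 1), ("Medium", 2), ("High", 3)]

-- def assign_severity(error_type): return SEVERITY_MAP.get(error_type, "Low")  (shared helper)
def assignSeverity (errorType : String) : String := sevMap.getD errorType "Low"

-- failure["error_type"]: first-match lookup; KeyError (= none) is excluded by Pre_, so the
-- getD default "" is never seen on admitted inputs
def getErrorType (failure : List (String × String)) : String :=
  (PySem.Dict.mk failure).getD "error_type" ""

-- the second for-loop: over SEVERITY_RANK.items(), return the first sev whose rank == highest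
def sevLoop : List (String × Int) → Int → String
  | [], _ => "Low"
  | (sev, rank) :: rest, highest => if rank = highest then sev else sevLoop rest highest

def compute_overall_severity (failures : List (List (String × String))) : String :=
  if failures = [] then "None"
  else
    let highest := failures.foldl (fun h failure =>
      let severity := assignSeverity (getErrorType failure)
      let rank := sevRank.getD severity 1
      max h rank) 0
    sevLoop sevRank.items highest

-- ===== PORT B =====
def compute_overall_severity_alt (failures : List (List (String × String))) : String :=
  if failures = [] then "None"
  else
    let sevs := failures.map (fun f => assignSeverity (getErrorType f))
    if sevs.contains "High" then "High"
    else if sevs.contains "Medium" then "Medium"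
    else if sevs.contains "Low" then "Low"
    else "Low"

-- ===== PRECONDITION & SPEC =====
-- Pre_ excludes exactly the inputs where A raises KeyError: a failure dict without an "error_type" key.
def Pre_compute_overall_severity (failures : List (List (String × String))) : Prop :=
  ∀ f ∈ failures, "error_type" ∈ f.map Prod.fst
instance (failures : List (List (String × String))) : Decidable (Pre_compute_overall_severity failures) := by unfold Pre_compute_overall_severity; infer_instance

def pvWitness_compute_overall_severity : (List (List (String × String))) :=
  [[("error_type", "QA Failure")], [("error_type", "whatever")]]

def Spec_compute_overall_severity (failures : List (List (String × String))) (out : String) : Prop := out = compute_overall_severity_alt failures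
instance (failures : List (List (String × String))) (out : String) : Decidable (Spec_compute_overall_severity failures out) := by unfold Spec_compute_overall_severity; infer_instance

-- ===== CLAIM (what is proved, stated in full; the proofs are below) =====
def Claim_equal_compute_overall_severity : Prop := ∀ (failures : List (List (String × String))), Dom_compute_overall_severity failures → Pre_compute_overall_severity failures → Spec_compute_overall_severity failures (compute_overall_severity failures)

-- ===== LEMMAS AND PROOFS =====

-- severity of one failure, and its rank
def sOf (f : List (String × String)) : String := assignSeverity (getErrorType f)
def rOf (f : List (String × String)) : Int := sevRank.getD (sOf f) 1

theorem sOf_tri (f : List (String × String)) :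
    sOf f = "High" ∨ sOf f = "Medium" ∨ sOf f = "Low" := by
  unfold sOf assignSeverity sevMap
  simp only [PySem.Dict.getD_eq_get?_getD, PySem.Dict.get?_mk_cons]
  split_ifs <;> simp [PySem.Dict.get?]

theorem rOf_eq (f : List (String × String)) :
    rOf f = if sOf f = "High" then 3 else if sOf f = "Medium" then 2 else 1 := by
  unfold rOf
  rcases sOf_tri f with h | h | h <;> rw [h] <;> decide

theorem rOf_bounds (f : List (String × String)) : 1 ≤ rOf f ∧ rOf f ≤ 3 := by
  rw [rOf_eq]; split_ifs <;> omega

theorem foldl_max_le_init (l : List (List (String × String))) (a : Int) :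
    a ≤ l.foldl (fun h f => max h (rOf f)) a := by
  induction l generalizing a with
  | nil => simp
  | cons x xs ih => exact le_trans (le_max_left a (rOf x)) (ih _)

theorem foldl_max_mem_le (l : List (List (String × String))) (a : Int)
    (f : List (String × String)) (hf : f ∈ l) :
    rOf f ≤ l.foldl (fun h g => max h (rOf g)) a := by
  induction l generalizing a with
  | nil => cases hf
  | cons x xs ih =>
    rcases List.mem_cons.mp hf with rfl | hmem
    · exact le_trans (le_max_right a (rOf f)) (foldl_max_le_init _ _)
    · exact ih _ hmem

theorem foldl_max_attained (l : List (List (String × String))) (a : Int) :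
    l.foldl (fun h f => max h (rOf f)) a = a ∨
    ∃ f ∈ l, l.foldl (fun h g => max h (rOf g)) a = rOf f := by
  induction l generalizing a with
  | nil => exact Or.inl rfl
  | cons x xs ih =>
    rcases ih (max a (rOf x)) with h | ⟨f, hf, hfe⟩
    · simp only [List.foldl_cons, h]
      by_cases hle : rOf x ≤ a
      · exact Or.inl (max_eq_left hle)
      · exact Or.inr ⟨x, List.mem_cons_self, max_eq_right (not_le.mp hle).le⟩
    · exact Or.inr ⟨f, List.mem_cons_of_mem _ hf, hfe⟩

theorem contains_sev (l : List (List (String × String))) (v : String) :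
    (l.map (fun f => assignSeverity (getErrorType f))).contains v =
      decide (∃ f ∈ l, sOf f = v) := by
  simp [List.mem_map, sOf, eq_comm]

theorem compute_overall_severity_spec : Claim_equal_compute_overall_severity := by
  intro failures _ _
  unfold Spec_compute_overall_severity compute_overall_severity compute_overall_severity_alt
  by_cases hnil : failures = []
  · simp [hnil]
  · simp only [if_neg hnil]
    set H := failures.foldl (fun h failure =>
      max h (sevRank.getD (assignSeverity (getErrorType failure)) 1)) 0 with hHdef
    have hHfold : H = failures.foldl (fun h f => max h (rOf f)) 0 := rfl
    obtain ⟨f0, hf0⟩ := List.exists_mem_of_ne_nil failures hnil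
    have h1le : 1 ≤ H := by
      rw [hHfold]
      exact le_trans (rOf_bounds f0).1 (foldl_max_mem_le _ _ _ hf0)
    have hattain : ∃ f ∈ failures, H = rOf f := by
      rcases foldl_max_attained failures 0 with h | h
      · rw [hHfold] at h1le; omega
      · rw [hHfold]; exact h
    obtain ⟨fa, hfa, hHa⟩ := hattain
    by_cases hH : ∃ f ∈ failures, sOf f = "High"
    · obtain ⟨fh, hfh, hsfh⟩ := hH
      have h3 : rOf fh = 3 := by rw [rOf_eq, hsfh]; simp
      have hge : 3 ≤ H := by rw [hHfold]; rw [← h3]; exact foldl_max_mem_le _ _ _ hfh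
      have hle : H ≤ 3 := hHa ▸ (rOf_bounds fa).2
      have hH3 : H = 3 := le_antisymm hle hge
      rw [hH3, contains_sev]
      simp only [decide_eq_true_eq]
      rw [if_pos ⟨fh, hfh, hsfh⟩]
      rfl
    · have hle2 : ∀ f ∈ failures, rOf f ≤ 2 := by
        intro f hf
        rw [rOf_eq]
        have hne : sOf f ≠ "High" := fun h => hH ⟨f, hf, h⟩
        split_ifs with h1 h2
        · exact absurd h1 hne
        · omega
        · omega
      have hHle2 : H ≤ 2 := hHa ▸ hle2 fa hfa
      rw [contains_sev, contains_sev]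
      simp only [decide_eq_true_eq]
      rw [if_neg (by simpa using hH)]
      by_cases hM : ∃ f ∈ failures, sOf f = "Medium"
      · obtain ⟨fm, hfm, hsfm⟩ := hM
        have h2 : rOf fm = 2 := by
          rw [rOf_eq, hsfm]
          have : sOf fm ≠ "High" := fun h => hH ⟨fm, hfm, h⟩
          simp [hsfm ▸ this]
        have hge : 2 ≤ H := by rw [hHfold, ← h2]; exact foldl_max_mem_le _ _ _ hfm
        have hH2 : H = 2 := le_antisymm hHle2 hge
        rw [hH2, if_pos ⟨fm, hfm, hsfm⟩]
        rfl
      · have hH1 : H = 1 := by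
          have : rOf fa ≤ 1 := by
            rw [rOf_eq]
            have hh : sOf fa ≠ "High" := fun h => hH ⟨fa, hfa, h⟩
            have hm : sOf fa ≠ "Medium" := fun h => hM ⟨fa, hfa, h⟩
            simp [hh, hm]
          omega
        rw [hH1, if_neg (by simpa using hM)]
        split_ifs <;> rfl

-- ===== VERDICT (by name: the statement is the Claim_ definition above) =====
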